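-- pv_equiv track=rewrite | github.com/MirandaHuallpa/Academia-SanTec | ejercicio1.py | getMaximumGrossValue
-- ===== SOURCE A (Python) =====
-- from itertools import combinations
--
-- def getMaximumGrossValue(arr):
--     # Write your code here
--     valores = []
--     n = len(arr)
--     comb = combinations([num for num in range(1,n+1)],3)
--
--     for i in comb:
--         indice1,indice2,indice3 = i
--         valor_bruto = sum(arr[0:indice1-1])-sum(arr[indice1-1:indice2-1])+sum(arr[indice2-1:indice3-1])-sum(arr[indice3-1:n])
--         valores.append(valor_bruto)
--
--     if valores == []:
--         return 1
--     else:
--         return max(valores)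
-- ===== SOURCE B (Python) =====
-- from itertools import accumulate
--
-- def getMaximumGrossValue(arr):
--     n = len(arr)
--     if n < 3:
--         return 1
--     P = list(accumulate(arr, initial=0))
--     bestA = P[0]
--     bestAB = bestA - P[1]
--     bestABC = bestAB + P[2]
--     for i in range(3, n):
--         bestA = max(bestA, P[i - 2])
--         bestAB = max(bestAB, bestA - P[i - 1])
--         bestABC = max(bestABC, bestAB + P[i])
--     return 2 * bestABC - P[n]
-- ===== Notes on version B (the rewrite author's own statement) =====
-- stated objective: faster
-- what changed: Replaced the enumeration of all C(n,3) cut-point triples with four slice sums each by one prefix-sum array and a single linear DP pass tracking the best P[a], P[a]-P[b] and P[a]-P[b]+P[c].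
import Mathlib
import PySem

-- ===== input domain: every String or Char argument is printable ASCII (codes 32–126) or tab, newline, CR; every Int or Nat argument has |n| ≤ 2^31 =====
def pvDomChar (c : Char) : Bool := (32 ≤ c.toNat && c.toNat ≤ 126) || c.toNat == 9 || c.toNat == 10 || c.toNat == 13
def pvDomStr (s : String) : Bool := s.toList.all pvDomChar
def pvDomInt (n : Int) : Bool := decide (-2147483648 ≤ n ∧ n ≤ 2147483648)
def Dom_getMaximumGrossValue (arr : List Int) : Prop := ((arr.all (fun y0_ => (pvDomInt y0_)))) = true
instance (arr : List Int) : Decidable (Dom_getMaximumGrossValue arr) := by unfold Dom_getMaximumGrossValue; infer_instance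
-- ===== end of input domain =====

-- B replaces A's enumeration of all C(n,3) index triples (each with four slice sums) by one
-- prefix-sum pass and a linear DP; equal return value on every input (A is total).

-- ===== PORT A =====
-- itertools.combinations(range(1, n+1), 3) in its lexicographic order
def combA (n : Int) : List (Int × Int × Int) :=
  (PySem.List.pyRange 1 (n + 1) 1).flatMap (fun i1 =>
    (PySem.List.pyRange (i1 + 1) (n + 1) 1).flatMap (fun i2 =>
      (PySem.List.pyRange (i2 + 1) (n + 1) 1).map (fun i3 => (i1, i2, i3))))

-- the loop body: valor_bruto for one triple (indice1, indice2, indice3)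
def valorA (arr : List Int) (t : Int × Int × Int) : Int :=
  (PySem.List.slice arr (some 0) (some (t.1 - 1))).sum
    - (PySem.List.slice arr (some (t.1 - 1)) (some (t.2.1 - 1))).sum
    + (PySem.List.slice arr (some (t.2.1 - 1)) (some (t.2.2 - 1))).sum
    - (PySem.List.slice arr (some (t.2.2 - 1)) (some (arr.length : Int))).sum

def getMaximumGrossValue (arr : List Int) : Int :=
  let n : Int := (arr.length : Int)
  let valores : List Int := (combA n).foldl (fun acc t => acc ++ [valorA arr t]) []
  if valores = [] then 1
  else (PySem.List.max? valores (fun y => y)).getD 0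

-- ===== PORT B =====
-- P = list(accumulate(arr, initial=0))
def prefB (arr : List Int) : List Int := List.scanl (· + ·) 0 arr

-- one iteration of the DP loop (i is the Python loop index)
def stepB (P : List Int) (s : Int × Int × Int) (i : Int) : Int × Int × Int :=
  let bA := max s.1 (PySem.List.pyGetD P (i - 2) 0)
  let bAB := max s.2.1 (bA - PySem.List.pyGetD P (i - 1) 0)
  let bABC := max s.2.2 (bAB + PySem.List.pyGetD P i 0)
  (bA, bAB, bABC)

def getMaximumGrossValue_alt (arr : List Int) : Int :=
  let n := arr.length
  if n < 3 then 1
  else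
    let P := prefB arr
    let bestA := PySem.List.pyGetD P 0 0
    let bestAB := bestA - PySem.List.pyGetD P 1 0
    let bestABC := bestAB + PySem.List.pyGetD P 2 0
    let st := (PySem.List.pyRange 3 (n : Int) 1).foldl (stepB P) (bestA, bestAB, bestABC)
    2 * st.2.2 - PySem.List.pyGetD P (n : Int) 0

-- ===== PRECONDITION & SPEC =====
def Spec_getMaximumGrossValue (arr : List Int) (out : Int) : Prop := out = getMaximumGrossValue_alt arr
instance (arr : List Int) (out : Int) : Decidable (Spec_getMaximumGrossValue arr out) := by unfold Spec_getMaximumGrossValue; infer_instance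

-- ===== CLAIM (what is proved, stated in full; the proofs are below) =====
def Claim_equal_getMaximumGrossValue : Prop := ∀ (arr : List Int), Dom_getMaximumGrossValue arr → Spec_getMaximumGrossValue arr (getMaximumGrossValue arr)

-- ===== LEMMAS AND PROOFS =====

-- prefix sum of the first k elements
def Pk (arr : List Int) (k : Nat) : Int := (arr.take k).sum

-- best P[a] over a < j (for 1 ≤ j)
def sA (arr : List Int) : Nat → Int
  | 0 => Pk arr 0
  | j + 1 => max (sA arr j) (Pk arr j)

-- best P[a] - P[b] over a < b < j (for 2 ≤ j)
def sAB (arr : List Int) : Nat → Int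
  | 0 => Pk arr 0 - Pk arr 1
  | j + 1 => if j < 2 then Pk arr 0 - Pk arr 1 else max (sAB arr j) (sA arr j - Pk arr j)

-- best P[a] - P[b] + P[c] over a < b < c < j (for 3 ≤ j)
def sABC (arr : List Int) : Nat → Int
  | 0 => Pk arr 0 - Pk arr 1 + Pk arr 2
  | j + 1 => if j < 3 then Pk arr 0 - Pk arr 1 + Pk arr 2 else max (sABC arr j) (sAB arr j + Pk arr j)

theorem slice_sum (arr : List Int) (a b : Int) (ha : 0 ≤ a) (hab : a ≤ b) :
    (PySem.List.slice arr (some a) (some b)).sum = Pk arr b.toNat - Pk arr a.toNat := by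
  rw [PySem.List.slice_toNat arr (a := a) (b := b) ha (le_trans ha hab)]
  have hsplit : arr.take b.toNat = arr.take a.toNat ++ List.take (b.toNat - a.toNat) (List.drop a.toNat arr) := by
    rw [← List.take_add]
    congr 1
    omega
  unfold Pk
  rw [hsplit, List.sum_append]
  ring

theorem valorA_eq (arr : List Int) (i1 i2 i3 : Int) (h1 : 1 ≤ i1) (h12 : i1 ≤ i2)
    (h23 : i2 ≤ i3) (h3 : i3 ≤ (arr.length : Int)) :
    valorA arr (i1, i2, i3) =
      2 * (Pk arr (i1 - 1).toNat - Pk arr (i2 - 1).toNat + Pk arr (i3 - 1).toNat)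
        - Pk arr arr.length := by
  unfold valorA
  rw [slice_sum arr 0 (i1 - 1) le_rfl (by omega),
      slice_sum arr (i1 - 1) (i2 - 1) (by omega) (by omega),
      slice_sum arr (i2 - 1) (i3 - 1) (by omega) (by omega),
      slice_sum arr (i3 - 1) (arr.length : Int) (by omega) (by omega)]
  simp [Pk]
  ring

theorem mem_combA (n i1 i2 i3 : Int) :
    (i1, i2, i3) ∈ combA n ↔ 1 ≤ i1 ∧ i1 < i2 ∧ i2 < i3 ∧ i3 ≤ n := by
  simp only [combA, List.mem_flatMap, List.mem_map, PySem.List.mem_pyRange_one, Prod.mk.injEq]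
  constructor
  · rintro ⟨a, ⟨ha1, ha2⟩, b, ⟨hb1, hb2⟩, c, ⟨⟨hc1, hc2⟩, rfl, rfl, rfl⟩⟩
    omega
  · rintro ⟨h1, h2, h3, h4⟩
    exact ⟨i1, ⟨by omega, by omega⟩, i2, ⟨by omega, by omega⟩, i3,
      ⟨⟨by omega, by omega⟩, rfl, rfl, rfl⟩⟩

theorem mem_valores (arr : List Int) (x : Int) :
    x ∈ (combA (arr.length : Int)).map (valorA arr) ↔
      ∃ a b c : Nat, a < b ∧ b < c ∧ c < arr.length ∧
        x = 2 * (Pk arr a - Pk arr b + Pk arr c) - Pk arr arr.length := by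
  rw [List.mem_map]
  constructor
  · rintro ⟨⟨i1, i2, i3⟩, ht, rfl⟩
    rw [mem_combA] at ht
    obtain ⟨h1, h2, h3, h4⟩ := ht
    refine ⟨(i1 - 1).toNat, (i2 - 1).toNat, (i3 - 1).toNat, by omega, by omega, by omega, ?_⟩
    exact valorA_eq arr i1 i2 i3 (by omega) (by omega) (by omega) (by omega)
  · rintro ⟨a, b, c, hab, hbc, hc, rfl⟩
    refine ⟨((a : Int) + 1, (b : Int) + 1, (c : Int) + 1), ?_, ?_⟩
    · rw [mem_combA]
      refine ⟨by omega, by omega, by omega, by omega⟩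
    · rw [valorA_eq arr _ _ _ (by omega) (by omega) (by omega) (by omega)]
      simp

theorem sA_bound (arr : List Int) : ∀ j a : Nat, a < j → Pk arr a ≤ sA arr j := by
  intro j
  induction j with
  | zero => intro a h; omega
  | succ j ih =>
    intro a h
    rcases Nat.lt_succ_iff_lt_or_eq.mp h with h' | rfl
    · exact le_trans (ih a h') (le_max_left _ _)
    · exact le_max_right _ _

theorem sA_mem (arr : List Int) : ∀ j : Nat, 1 ≤ j → ∃ a, a < j ∧ sA arr j = Pk arr a := by
  intro j
  induction j with
  | zero => intro h; omega
  | succ j ih =>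
    intro _
    by_cases hj : 1 ≤ j
    · obtain ⟨a, ha, hval⟩ := ih hj
      rcases max_cases (sA arr j) (Pk arr j) with ⟨hm, _⟩ | ⟨hm, _⟩
      · refine ⟨a, by omega, ?_⟩
        rw [show sA arr (j + 1) = max (sA arr j) (Pk arr j) by simp [sA], hm, hval]
      · refine ⟨j, by omega, ?_⟩
        rw [show sA arr (j + 1) = max (sA arr j) (Pk arr j) by simp [sA], hm]
    · have hz : j = 0 := by omega
      subst hz
      exact ⟨0, by omega, by simp [sA]⟩

theorem sAB_bound (arr : List Int) :
    ∀ j a b : Nat, a < b → b < j → Pk arr a - Pk arr b ≤ sAB arr j := by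
  intro j
  induction j with
  | zero => intro a b _ h; omega
  | succ j ih =>
    intro a b hab hbj
    by_cases hj : j < 2
    · have ha : a = 0 ∧ b = 1 := by omega
      obtain ⟨rfl, rfl⟩ := ha
      simp [sAB, hj]
    · rw [show sAB arr (j + 1) = max (sAB arr j) (sA arr j - Pk arr j) by simp [sAB, hj]]
      rcases Nat.lt_succ_iff_lt_or_eq.mp hbj with h' | rfl
      · exact le_trans (ih a b hab h') (le_max_left _ _)
      · exact le_trans (by have := sA_bound arr b a hab; omega) (le_max_right _ _)

theorem sAB_mem (arr : List Int) :
    ∀ j : Nat, 2 ≤ j → ∃ a b, a < b ∧ b < j ∧ sAB arr j = Pk arr a - Pk arr b := by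
  intro j
  induction j with
  | zero => intro h; omega
  | succ j ih =>
    intro _
    by_cases hj : j < 2
    · exact ⟨0, 1, by omega, by omega, by simp [sAB, hj]⟩
    · rw [show sAB arr (j + 1) = max (sAB arr j) (sA arr j - Pk arr j) by simp [sAB, hj]]
      rcases max_cases (sAB arr j) (sA arr j - Pk arr j) with ⟨hm, _⟩ | ⟨hm, _⟩
      · obtain ⟨a, b, hab, hbj', hval⟩ := ih (by omega)
        exact ⟨a, b, hab, by omega, by rw [hm, hval]⟩
      · obtain ⟨a, ha, hval⟩ := sA_mem arr j (by omega)
        exact ⟨a, j, ha, by omega, by rw [hm, hval]⟩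

theorem sABC_bound (arr : List Int) :
    ∀ j a b c : Nat, a < b → b < c → c < j →
      Pk arr a - Pk arr b + Pk arr c ≤ sABC arr j := by
  intro j
  induction j with
  | zero => intro a b c _ _ h; omega
  | succ j ih =>
    intro a b c hab hbc hcj
    by_cases hj : j < 3
    · have h : a = 0 ∧ b = 1 ∧ c = 2 := by omega
      obtain ⟨rfl, rfl, rfl⟩ := h
      simp [sABC, hj]
    · rw [show sABC arr (j + 1) = max (sABC arr j) (sAB arr j + Pk arr j) by simp [sABC, hj]]
      rcases Nat.lt_succ_iff_lt_or_eq.mp hcj with h' | rfl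
      · exact le_trans (ih a b c hab hbc h') (le_max_left _ _)
      · exact le_trans (by have := sAB_bound arr c a b hab hbc; omega) (le_max_right _ _)

theorem sABC_mem (arr : List Int) :
    ∀ j : Nat, 3 ≤ j → ∃ a b c, a < b ∧ b < c ∧ c < j ∧
      sABC arr j = Pk arr a - Pk arr b + Pk arr c := by
  intro j
  induction j with
  | zero => intro h; omega
  | succ j ih =>
    intro _
    by_cases hj : j < 3
    · exact ⟨0, 1, 2, by omega, by omega, by omega, by simp [sABC, hj]⟩
    · rw [show sABC arr (j + 1) = max (sABC arr j) (sAB arr j + Pk arr j) by simp [sABC, hj]]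
      rcases max_cases (sABC arr j) (sAB arr j + Pk arr j) with ⟨hm, _⟩ | ⟨hm, _⟩
      · obtain ⟨a, b, c, hab, hbc, hcj', hval⟩ := ih (by omega)
        exact ⟨a, b, c, hab, hbc, by omega, by rw [hm, hval]⟩
      · obtain ⟨a, b, hab, hbj, hval⟩ := sAB_mem arr j (by omega)
        exact ⟨a, b, j, hab, hbj, by omega, by rw [hm, hval]⟩

theorem scanl_eq (arr : List Int) : ∀ s : Int,
    List.scanl (· + ·) s arr = (List.range (arr.length + 1)).map (fun k => s + (arr.take k).sum) := by
  induction arr with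
  | nil => intro s; simp
  | cons x xs ih =>
    intro s
    rw [List.scanl_cons, ih (s + x)]
    have hr : List.range ((x :: xs).length + 1) = 0 :: (List.range (xs.length + 1)).map Nat.succ := by
      have h' : (x :: xs).length + 1 = (xs.length + 1) + 1 := by simp
      rw [h', List.range_succ_eq_map]
    rw [hr]
    simp only [List.map_cons, List.map_map]
    congr 1
    · simp
    · apply List.map_congr_left
      intro k _
      simp [List.take_succ_cons]
      ring

theorem P_get (arr : List Int) (k : Nat) (hk : k ≤ arr.length) :
    PySem.List.pyGetD (prefB arr) ((k : Int)) 0 = Pk arr k := by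
  rw [PySem.List.pyGetD_natCast, prefB, scanl_eq]
  rw [List.getD_eq_getElem?_getD, List.getElem?_map]
  simp [List.getElem?_range (by omega : k < arr.length + 1), Pk]

theorem fold_inv (arr : List Int) :
    ∀ m : Nat, m + 3 ≤ arr.length →
      (PySem.List.pyRange 3 (3 + (m : Int)) 1).foldl (stepB (prefB arr))
        (Pk arr 0, Pk arr 0 - Pk arr 1, Pk arr 0 - Pk arr 1 + Pk arr 2)
      = (sA arr (m + 1), sAB arr (m + 2), sABC arr (m + 3)) := by
  intro m
  induction m with
  | zero =>
    intro _
    rw [show (3 + ((0 : Nat) : Int)) = 3 by simp, PySem.List.pyRange_one_eq_nil le_rfl]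
    simp [sA, sAB, sABC]
  | succ m ih =>
    intro hm
    have e1 : 3 + ((m + 1 : Nat) : Int) = (3 + (m : Int)) + 1 := by omega
    rw [e1, PySem.List.pyRange_one_succ_right (by omega), List.foldl_append, ih (by omega)]
    simp only [List.foldl_cons, List.foldl_nil]
    have e2 : (3 + (m : Int)) - 2 = ((m + 1 : Nat) : Int) := by omega
    have e3 : (3 + (m : Int)) - 1 = ((m + 2 : Nat) : Int) := by omega
    have e4 : (3 + (m : Int)) = ((m + 3 : Nat) : Int) := by omega
    rw [stepB, e2, e3, e4, P_get arr (m + 1) (by omega), P_get arr (m + 2) (by omega),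
        P_get arr (m + 3) (by omega)]
    have hA : max (sA arr (m + 1)) (Pk arr (m + 1)) = sA arr (m + 2) := by simp [sA]
    rw [hA]
    have hAB : max (sAB arr (m + 2)) (sA arr (m + 2) - Pk arr (m + 2)) = sAB arr (m + 3) := by
      simp [sAB, show ¬ (m + 2 < 2) by omega]
    rw [hAB]
    have hABC : max (sABC arr (m + 3)) (sAB arr (m + 3) + Pk arr (m + 3)) = sABC arr (m + 4) := by
      simp [sABC, show ¬ (m + 3 < 3) by omega]
    rw [hABC]

theorem B_eq (arr : List Int) (h3 : 3 ≤ arr.length) :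
    getMaximumGrossValue_alt arr = 2 * sABC arr arr.length - Pk arr arr.length := by
  rw [getMaximumGrossValue_alt]
  simp only [if_neg (by omega : ¬ arr.length < 3)]
  have h0 := P_get arr 0 (by omega)
  have h1 := P_get arr 1 (by omega)
  have h2 := P_get arr 2 (by omega)
  have hn := P_get arr arr.length le_rfl
  simp only [Nat.cast_zero, Nat.cast_one, Nat.cast_ofNat] at h0 h1 h2
  rw [h0, h1, h2, hn]
  have e : ((arr.length : Int)) = 3 + ((arr.length - 3 : Nat) : Int) := by omega
  rw [e, fold_inv arr (arr.length - 3) (by omega)]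
  rw [show arr.length - 3 + 3 = arr.length by omega]

theorem valores_eq (arr : List Int) :
    (combA (arr.length : Int)).foldl (fun acc t => acc ++ [valorA arr t]) []
      = (combA (arr.length : Int)).map (valorA arr) := by
  rw [PySem.List.foldl_append_singleton_eq_map]
  simp

theorem A_eq_lt (arr : List Int) (h : arr.length < 3) : getMaximumGrossValue arr = 1 := by
  rw [getMaximumGrossValue]
  simp only [valores_eq]
  rw [if_pos]
  rw [List.eq_nil_iff_forall_not_mem]
  intro x hx
  rw [mem_valores] at hx
  obtain ⟨a, b, c, hab, hbc, hc, _⟩ := hx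
  omega

theorem A_eq_ge (arr : List Int) (h3 : 3 ≤ arr.length) :
    getMaximumGrossValue arr = 2 * sABC arr arr.length - Pk arr arr.length := by
  rw [getMaximumGrossValue]
  simp only [valores_eq]
  set V := (combA (arr.length : Int)).map (valorA arr) with hV
  have hvmem : (2 * sABC arr arr.length - Pk arr arr.length) ∈ V := by
    rw [hV, mem_valores]
    obtain ⟨a, b, c, hab, hbc, hc, hval⟩ := sABC_mem arr arr.length h3
    exact ⟨a, b, c, hab, hbc, hc, by rw [hval]⟩
  have hne : V ≠ [] := List.ne_nil_of_mem hvmem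
  rw [if_neg hne]
  obtain ⟨m, hm⟩ : ∃ m, PySem.List.max? V (fun y => y) = some m := by
    cases hmx : PySem.List.max? V (fun y => y) with
    | none => exact absurd ((PySem.List.max?_eq_none_iff V _).mp hmx) hne
    | some m => exact ⟨m, rfl⟩
  rw [hm, Option.getD_some]
  have hmem := PySem.List.max?_mem hm
  have hmax := PySem.List.max?_isMax hm
  have h1 : m ≤ 2 * sABC arr arr.length - Pk arr arr.length := by
    rw [hV, mem_valores] at hmem
    obtain ⟨a, b, c, hab, hbc, hc, rfl⟩ := hmem
    have := sABC_bound arr arr.length a b c hab hbc hc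
    omega
  have h2 : 2 * sABC arr arr.length - Pk arr arr.length ≤ m := hmax _ hvmem
  omega

-- ===== VERDICT (by name: the statement is the Claim_ definition above) =====
theorem getMaximumGrossValue_spec : Claim_equal_getMaximumGrossValue := by
  intro arr _
  unfold Spec_getMaximumGrossValue
  by_cases h : arr.length < 3
  · rw [A_eq_lt arr h, getMaximumGrossValue_alt]
    simp [h]
  · rw [A_eq_ge arr (by omega), B_eq arr (by omega)]
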